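-- pv_equiv track=rewrite | github.com/hargon24/Context_aware_NMT | document_utilities.py | arrange_test_batch
-- ===== SOURCE A (Python) =====
-- def arrange_test_batch(pool, batch_size):
--     batch = list()
--     result = list()
--     for document in pool:
--         batch.append(document)
--         if len(batch) == batch_size:
--             max_length = max([len(x) for x in batch])
--             for i in range(len(batch)):
--                 while len(batch[i]) < max_length:
--                     batch[i].append([-1])
--             result.append(list(zip(*batch)))
--             batch = list()
--
--     if len(batch) > 0:
--         max_length = max([len(x) for x in batch])
--         for i in range(len(batch)):
--             while len(batch[i]) < max_length:
--                 batch[i].append([-1])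
--         result.append(list(zip(*batch)))
--
--     return result
-- ===== SOURCE B (Python) =====
-- def arrange_test_batch(pool, batch_size):
--     docs = list(pool)
--     chunks = [docs[i:i + batch_size] for i in range(0, len(docs), batch_size)]
--     result = []
--     for chunk in chunks:
--         max_length = max(len(x) for x in chunk)
--         for doc in chunk:
--             doc.extend([[-1]] * (max_length - len(doc)))
--         result.append(list(zip(*chunk)))
--     return result
-- ===== Notes on version B (the rewrite author's own statement) =====
-- stated objective: simpler
-- what changed: B slices the pool into fixed-size chunks up front with range-step indexing and applies one uniform pad-and-transpose pass per chunk, removing A's one-at-a-time accumulator with its length-check branch and duplicated post-loop flush block; Pre_ excludes non-positive batch_size, which is outside the natural domain of a batch size: there B's range-step chunking raises ValueError on step 0 and yields no chunks on a negative step, while A puts the whole pool into one batch.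
-- outside the precondition, e.g. on arrange_test_batch([[[1]], [[2], [3]]], 0): A returns [[([1], [2]), ([-1], [3])]], B raises ValueError; on arrange_test_batch([[[1]], [[2], [3]]], -1): A returns [[([1], [2]), ([-1], [3])]], B returns []
import Mathlib
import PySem

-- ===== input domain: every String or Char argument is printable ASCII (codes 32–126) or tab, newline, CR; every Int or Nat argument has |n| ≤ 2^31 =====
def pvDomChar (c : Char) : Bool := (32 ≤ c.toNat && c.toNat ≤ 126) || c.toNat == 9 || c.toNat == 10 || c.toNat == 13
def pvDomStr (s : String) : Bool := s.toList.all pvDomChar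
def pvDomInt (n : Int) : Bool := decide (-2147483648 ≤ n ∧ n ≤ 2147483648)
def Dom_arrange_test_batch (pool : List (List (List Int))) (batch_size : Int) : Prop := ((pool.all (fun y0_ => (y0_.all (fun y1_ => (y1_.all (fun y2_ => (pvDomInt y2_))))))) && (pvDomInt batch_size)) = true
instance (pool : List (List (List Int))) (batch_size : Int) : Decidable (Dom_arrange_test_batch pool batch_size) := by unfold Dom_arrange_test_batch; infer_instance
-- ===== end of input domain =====

-- B slices the pool into fixed-size chunks up front and applies one uniform pad-and-transpose
-- pass per chunk, removing A's accumulator branch and duplicated flush block (objective: simpler).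
-- Both Pythons mutate the document lists in place when padding; the equivalence proved here is
-- about the RETURN value only.

-- ===== PORT A =====
-- shared port of Python's zip(*xss): rows up to the minimum length
def pyZip (xss : List (List (List Int))) : List (List (List Int)) :=
  (List.range ((xss.map List.length).min?.getD 0)).map (fun i => xss.map (fun xs => xs.getD i []))

-- A's while-loop: append [-1] until the document reaches max_length
def padA (m : Nat) (d : List (List Int)) : List (List Int) :=
  if d.length < m then padA m (d ++ [[-1]]) else d
  termination_by m - d.length
  decreasing_by simp; omega

-- A's loop body, acting on the state (batch, result)
def stepA (batch_size : Int) (st : List (List (List Int)) × List (List (List (List Int))))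
    (document : List (List Int)) : List (List (List Int)) × List (List (List (List Int))) :=
  let batch := st.1 ++ [document]
  if (batch.length : Int) = batch_size then
    let max_length := (PySem.List.max? (batch.map (fun x => x.length)) id).getD 0
    ([], st.2 ++ [pyZip (batch.map (fun d => padA max_length d))])
  else (batch, st.2)

def arrange_test_batch (pool : List (List (List Int))) (batch_size : Int) : List (List (List (List Int))) :=
  let st := pool.foldl (stepA batch_size) ([], [])
  if st.1.length > 0 then
    let max_length := (PySem.List.max? (st.1.map (fun x => x.length)) id).getD 0
    st.2 ++ [pyZip (st.1.map (fun d => padA max_length d))]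
  else st.2

-- ===== PORT B =====
def arrange_test_batch_alt (pool : List (List (List Int))) (batch_size : Int) : List (List (List (List Int))) :=
  let docs := pool
  let chunks := (PySem.List.pyRange 0 docs.length batch_size).map
    (fun i => PySem.List.slice docs (some i) (some (i + batch_size)))
  chunks.map (fun chunk =>
    let max_length := (PySem.List.max? (chunk.map (fun x => x.length)) id).getD 0
    pyZip (chunk.map (fun d => d ++ List.replicate (max_length - d.length) [-1])))

-- ===== PRECONDITION & SPEC =====
-- Pre_ excludes non-positive batch_size (outside the natural domain of a batch size): there
-- B's range-step chunking raises ValueError on step 0 and yields no chunks on a negative step,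
-- while A puts the whole pool into one batch.
def Pre_arrange_test_batch (pool : List (List (List Int))) (batch_size : Int) : Prop :=
  1 ≤ batch_size
instance (pool : List (List (List Int))) (batch_size : Int) : Decidable (Pre_arrange_test_batch pool batch_size) := by unfold Pre_arrange_test_batch; infer_instance

def pvWitness_arrange_test_batch : List (List (List Int)) × Int := ([[[1]], [[2], [3]], [[4]]], 2)

def Spec_arrange_test_batch (pool : List (List (List Int))) (batch_size : Int) (out : List (List (List (List Int)))) : Prop := out = arrange_test_batch_alt pool batch_size
instance (pool : List (List (List Int))) (batch_size : Int) (out : List (List (List (List Int)))) : Decidable (Spec_arrange_test_batch pool batch_size out) := by unfold Spec_arrange_test_batch; infer_instance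

-- ===== CLAIM (what is proved, stated in full; the proofs are below) =====
def Claim_equal_arrange_test_batch : Prop := ∀ (pool : List (List (List Int))) (batch_size : Int), Dom_arrange_test_batch pool batch_size → Pre_arrange_test_batch pool batch_size → Spec_arrange_test_batch pool batch_size (arrange_test_batch pool batch_size)

-- ===== LEMMAS AND PROOFS =====

-- the common per-chunk processing (B's form)
def proc (chunk : List (List (List Int))) : List (List (List Int)) :=
  let m := (PySem.List.max? (chunk.map (fun x => x.length)) id).getD 0
  pyZip (chunk.map (fun d => d ++ List.replicate (m - d.length) [-1]))

lemma padA_eq (m : Nat) (d : List (List Int)) :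
    padA m d = d ++ List.replicate (m - d.length) ([-1] : List Int) := by
  fun_induction padA m d with
  | case1 d h ih =>
    rw [ih]
    have : m - d.length = (m - (d ++ [[-1]]).length) + 1 := by simp; omega
    rw [this, List.replicate_succ]
    simp
  | case2 d h =>
    have : m - d.length = 0 := by omega
    simp [this]

def chunksRec {α : Type} (s : Nat) : List α → List (List α)
  | [] => []
  | x :: t => (x :: t.take (s - 1)) :: chunksRec s (t.drop (s - 1))
  termination_by l => l.length
  decreasing_by simp

lemma chunksRec_cons {α : Type} (s : Nat) (hs : 1 ≤ s) (l : List α) (hl : l ≠ []) :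
    chunksRec s l = l.take s :: chunksRec s (l.drop s) := by
  obtain ⟨k, rfl⟩ : ∃ k, s = k + 1 := ⟨s - 1, by omega⟩
  cases l with
  | nil => exact absurd rfl hl
  | cons x t => simp [chunksRec]

lemma pyRange_shift (a b s : Int) (hs : 0 < s) :
    PySem.List.pyRange (a + s) b s = (PySem.List.pyRange a (b - s) s).map (· + s) := by
  rw [PySem.List.pyRange_of_pos _ _ hs, PySem.List.pyRange_of_pos _ _ hs, List.map_map]
  have he : a + s < b ↔ a < b - s := by omega
  have he2 : b - (a + s) + s - 1 = b - s - a + s - 1 := by ring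
  simp only [he, he2]
  congr 1
  funext k
  simp; ring

lemma pyRange_pos_cons (a b s : Int) (hs : 0 < s) (hab : a < b) :
    PySem.List.pyRange a b s = a :: PySem.List.pyRange (a + s) b s := by
  rw [PySem.List.pyRange_of_pos _ _ hs, PySem.List.pyRange_of_pos _ _ hs, if_pos hab]
  have hx : 0 ≤ b - a - 1 := by omega
  have hcount : b - a + s - 1 = (b - a - 1) + 1 * s := by ring
  have h1 : (b - a + s - 1) / s = (b - a - 1) / s + 1 := by
    rw [hcount, Int.add_mul_ediv_right _ _ (by omega)]
  by_cases h2 : a + s < b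
  · rw [if_pos h2]
    have : b - (a + s) + s - 1 = b - a - 1 := by ring
    rw [this, h1]
    have hq : 0 ≤ (b - a - 1) / s := Int.ediv_nonneg hx (by omega)
    have : ((b - a - 1) / s + 1).toNat = ((b - a - 1) / s).toNat + 1 := by omega
    rw [this, List.range_succ_eq_map]
    simp [List.map_map]
    intro k _
    ring
  · rw [if_neg h2, h1]
    have hz : (b - a - 1) / s = 0 := Int.ediv_eq_zero_of_lt hx (by omega)
    rw [hz]
    simp

lemma chunks_eq (s : Nat) (hs : 1 ≤ s) (docs : List (List (List Int))) :
    (PySem.List.pyRange 0 docs.length (s : Int)).map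
      (fun i => PySem.List.slice docs (some i) (some (i + (s : Int)))) = chunksRec s docs := by
  induction hn : docs.length using Nat.strong_induction_on generalizing docs with
  | _ n ih =>
  subst hn
  cases docs with
  | nil =>
    rw [PySem.List.pyRange_of_pos _ _ (by exact_mod_cast hs)]
    simp [chunksRec]
  | cons x t =>
    have hne : (x :: t) ≠ ([] : List (List (List Int))) := by simp
    have hpos : (0 : Int) < (s : Int) := by exact_mod_cast hs
    have hlen : (0 : Int) < ((x :: t).length : Int) := by simp
    rw [pyRange_pos_cons _ _ _ hpos hlen, pyRange_shift 0 _ _ hpos]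
    have hrange : PySem.List.pyRange 0 (((x :: t).length : Int) - (s : Int)) (s : Int)
        = PySem.List.pyRange 0 ((((x :: t).drop s).length : Nat) : Int) (s : Int) := by
      rw [List.length_drop]
      by_cases h : s ≤ (x :: t).length
      · congr 1; omega
      · rw [PySem.List.pyRange_of_pos _ _ hpos, PySem.List.pyRange_of_pos _ _ hpos,
            if_neg (by omega), if_neg (by omega)]
    rw [chunksRec_cons s hs _ hne]
    simp only [List.map_cons, List.map_map]
    congr 1
    · rw [zero_add, PySem.List.slice_zero_start, PySem.List.slice_to _ (by positivity)]
      simp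
    · rw [hrange, ← ih (((x :: t).drop s).length)
        (by rw [List.length_drop]; simp; omega) _ rfl]
      apply List.map_congr_left
      intro i hi
      have h0 : 0 ≤ i := ((PySem.List.mem_pyRange_iff_of_pos hpos i).mp hi).1
      obtain ⟨j, rfl⟩ : ∃ j : Nat, i = (j : Int) := ⟨i.toNat, by omega⟩
      simp only [Function.comp]
      have t1 : (((j:Int) + (s:Int))).toNat = j + s := by omega
      have t2 : (((j:Int) + (s:Int) + (s:Int))).toNat = j + s + s := by omega
      have t3 : ((j:Int)).toNat = j := by omega
      rw [PySem.List.slice_toNat _ (by positivity) (by positivity),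
          PySem.List.slice_toNat _ (by positivity) (by positivity), t1, t2, t3,
          List.drop_drop]
      congr 1
      · omega
      · congr 1
        omega

lemma stepA_proc (b : Int) (st : List (List (List Int)) × List (List (List (List Int))))
    (d : List (List Int)) :
    stepA b st d = if ((st.1 ++ [d]).length : Int) = b
      then ([], st.2 ++ [proc (st.1 ++ [d])]) else (st.1 ++ [d], st.2) := by
  simp only [stepA, proc, padA_eq]

lemma foldA_small (b : Int) (_hb : 0 < b) (l : List (List (List Int)))
    (batch : List (List (List Int))) (r : List (List (List (List Int))))
    (h : batch.length + l.length < b.toNat) :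
    l.foldl (stepA b) (batch, r) = (batch ++ l, r) := by
  induction l generalizing batch with
  | nil => simp
  | cons d t ih =>
    have hne : ¬(((batch ++ [d]).length : Int) = b) := by
      have h' := h; simp at h' ⊢; omega
    simp only [List.foldl_cons, stepA_proc, if_neg hne]
    rw [ih _ (by simp at h ⊢; omega)]
    simp

lemma foldA_chunk (b : Int) (hb : 0 < b) (l : List (List (List Int)))
    (batch : List (List (List Int))) (r : List (List (List (List Int))))
    (h1 : batch.length < b.toNat) (h2 : b.toNat ≤ batch.length + l.length) :
    l.foldl (stepA b) (batch, r)
      = (l.drop (b.toNat - batch.length)).foldl (stepA b)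
          ([], r ++ [proc (batch ++ l.take (b.toNat - batch.length))]) := by
  induction l generalizing batch r with
  | nil => simp at h2; omega
  | cons d t ih =>
    by_cases hc : batch.length + 1 = b.toNat
    · have hfire : (((batch ++ [d]).length : Int) = b) := by simp; omega
      have hk : b.toNat - batch.length = 1 := by omega
      simp only [List.foldl_cons, stepA_proc, if_pos hfire, hk, List.take_succ_cons,
        List.take_zero, List.drop_succ_cons, List.drop_zero]
    · have hne : ¬(((batch ++ [d]).length : Int) = b) := by simp; omega
      have hk : b.toNat - batch.length = (b.toNat - (batch ++ [d]).length) + 1 := by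
        simp; omega
      simp only [List.foldl_cons, stepA_proc, if_neg hne]
      rw [ih (batch ++ [d]) r (by simp; omega) (by simp at h2 ⊢; omega), hk]
      simp

lemma foldA_main (b : Int) (hb : 0 < b) (l : List (List (List Int)))
    (r : List (List (List (List Int)))) :
    (if (l.foldl (stepA b) ([], r)).1.length > 0 then
       (l.foldl (stepA b) ([], r)).2 ++
         [pyZip ((l.foldl (stepA b) ([], r)).1.map (fun d =>
           padA ((PySem.List.max? ((l.foldl (stepA b) ([], r)).1.map (fun x => x.length)) id).getD 0) d))]
     else (l.foldl (stepA b) ([], r)).2)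
      = r ++ (chunksRec b.toNat l).map proc := by
  induction hn : l.length using Nat.strong_induction_on generalizing l r with
  | _ n ih =>
  subst hn
  by_cases hsmall : l.length < b.toNat
  · rw [show l.foldl (stepA b) ([], r) = ([] ++ l, r) from
      foldA_small b hb l [] r (by simpa using hsmall)]
    simp only [List.nil_append]
    cases l with
    | nil => simp [chunksRec]
    | cons x t =>
      rw [chunksRec_cons b.toNat (by omega) _ (by simp)]
      rw [List.take_of_length_le (by simp at hsmall ⊢; omega),
          List.drop_of_length_le (by simp at hsmall ⊢; omega)]
      simp only [chunksRec, List.map_cons, List.map_nil]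
      have hpos : ((x :: t).length > 0) := by simp
      simp only [if_pos hpos]
      simp [padA_eq, proc]
  · have hrw := foldA_chunk b hb l [] r (by simp; omega) (by simp; omega)
    simp only [List.length_nil, Nat.sub_zero, List.nil_append] at hrw
    rw [hrw]
    rw [ih (l.drop b.toNat).length (by simp; omega) _ _ rfl]
    rw [chunksRec_cons b.toNat (by omega) l (by intro h; subst h; simp at hsmall; omega)]
    simp

-- ===== VERDICT (by name: the statement is the Claim_ definition above) =====
theorem arrange_test_batch_spec : Claim_equal_arrange_test_batch := by
  intro pool batch_size _ hb
  have hcast : (batch_size : Int) = ((batch_size.toNat : Nat) : Int) := by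
    unfold Pre_arrange_test_batch at hb; omega
  have h1 : 1 ≤ batch_size.toNat := by unfold Pre_arrange_test_batch at hb; omega
  simp only [Spec_arrange_test_batch, arrange_test_batch, arrange_test_batch_alt]
  rw [hcast, chunks_eq batch_size.toNat h1 pool,
      foldA_main ((batch_size.toNat : Nat) : Int) (by omega) pool []]
  simp only [Int.toNat_natCast, List.nil_append]
  apply List.map_congr_left
  intro chunk _
  simp [proc]
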